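-- pv_equiv track=rewrite | github.com/care101/LintCode | Python/string/ReverseWordsII.py | reverseChar
-- ===== SOURCE A (Python) =====
-- def reverseChar(a, start, end):
--     i, j = start, end
--     while i < j:
--         temp = a[i]
--         a[i] = a[j]
--         a[j] = temp
--         i, j = i+1, j-1
--     return a
-- ===== SOURCE B (Python) =====
-- def reverseChar(a, start, end):
--     # Reverse the segment with one slice assignment instead of a pairwise swap loop.
--     if start < end:
--         a[start:end+1] = a[start:end+1][::-1]
--     return a
-- ===== Notes on version B (the rewrite author's own statement) =====
-- stated objective: alternative
-- what changed: B replaces A's in-place pairwise swap loop by a single slice assignment a[start:end+1] = a[start:end+1][::-1]; same O(k) cost, different mechanism (splice of a reversed copy instead of index-by-index swaps).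
-- outside the precondition, e.g. on reverseChar([1, 2], -2, 1): A returns [1, 2], B returns [2, 1]; on reverseChar([1, 2, 3], -3, -1): A returns [3, 2, 1], B returns [1, 2, 3]
import Mathlib
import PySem

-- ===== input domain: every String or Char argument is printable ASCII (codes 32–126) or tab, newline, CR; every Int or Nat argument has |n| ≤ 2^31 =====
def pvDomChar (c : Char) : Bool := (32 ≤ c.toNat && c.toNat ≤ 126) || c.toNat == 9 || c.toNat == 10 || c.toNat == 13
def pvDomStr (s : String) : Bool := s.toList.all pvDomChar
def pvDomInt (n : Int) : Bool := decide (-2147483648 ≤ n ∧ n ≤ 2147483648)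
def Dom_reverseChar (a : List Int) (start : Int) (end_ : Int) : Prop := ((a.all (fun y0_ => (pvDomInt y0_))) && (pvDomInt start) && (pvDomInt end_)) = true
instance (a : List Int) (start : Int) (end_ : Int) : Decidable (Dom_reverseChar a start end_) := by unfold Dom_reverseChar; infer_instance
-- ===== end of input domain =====

-- B replaces A's in-place swap loop by one slice-assignment splice of the reversed segment; equivalence is
-- about the return value (both Pythons mutate `a` in place in the same way on Pre_).

-- ===== PORT A =====
-- the while loop: state (a, i, j); `| _, _ => a` is where Python raises IndexError (excluded by Pre_)
def reverseCharLoop (a : List Int) (i j : Int) : List Int :=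
  if _h : i < j then
    match PySem.List.pyGet? a i, PySem.List.pyGet? a j with
    | some temp, some aj =>
        reverseCharLoop (PySem.List.pySetD (PySem.List.pySetD a i aj) j temp) (i + 1) (j - 1)
    | _, _ => a
  else a
termination_by (j - i).toNat
decreasing_by omega

def reverseChar (a : List Int) (start : Int) (end_ : Int) : List Int :=
  reverseCharLoop a start end_

-- ===== PORT B =====
-- a[start:end+1] = a[start:end+1][::-1]; slice assignment of a step-1 slice splices:
-- result = a[:lo] ++ v ++ a[hi:] with lo, hi the clamped slice bounds and hi raised to lo when the
-- bounds cross, exactly as CPython's slice assignment does; seg[::-1] is seg.reverse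
-- (PySem.List.slice?_none_none_neg_one)
def reverseChar_alt (a : List Int) (start : Int) (end_ : Int) : List Int :=
  if start < end_ then
    let seg := PySem.List.slice a (some start) (some (end_ + 1))
    let lo := PySem.List.clampIdx a.length start
    let hi := max lo (PySem.List.clampIdx a.length (end_ + 1))
    a.take lo ++ seg.reverse ++ a.drop hi
  else a

-- ===== PRECONDITION & SPEC =====
-- Pre_ excludes calls with start < end and a negative wrapped index: there A returns an accidental
-- permutation produced by comparing raw indices while accessing wrapped ones (it can even swap a pair
-- back, or reverse when both indices are negative), a value no caller would specify; B applies
-- Python slice semantics there.  (Pre_ also excludes out-of-range indices, on which A raises IndexError.)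
def Pre_reverseChar (a : List Int) (start : Int) (end_ : Int) : Prop :=
  end_ ≤ start ∨ (0 ≤ start ∧ end_ < a.length)
instance (a : List Int) (start : Int) (end_ : Int) : Decidable (Pre_reverseChar a start end_) := by
  unfold Pre_reverseChar; infer_instance

def pvWitness_reverseChar : List Int × Int × Int := ([1, 2, 3, 4], 1, 3)

def Spec_reverseChar (a : List Int) (start : Int) (end_ : Int) (out : List Int) : Prop := out = reverseChar_alt a start end_
instance (a : List Int) (start : Int) (end_ : Int) (out : List Int) : Decidable (Spec_reverseChar a start end_ out) := by unfold Spec_reverseChar; infer_instance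

-- ===== CLAIM (what is proved, stated in full; the proofs are below) =====
def Claim_equal_reverseChar : Prop := ∀ (a : List Int) (start : Int) (end_ : Int), Dom_reverseChar a start end_ → Pre_reverseChar a start end_ → Spec_reverseChar a start end_ (reverseChar a start end_)

-- ===== LEMMAS AND PROOFS =====

-- Loop invariant: on the decomposition a = xs ++ ms ++ zs with i = |xs| and j pointing at the
-- last element of ms, the loop reverses exactly ms.
theorem reverseCharLoop_decomp_aux (n : Nat) :
    ∀ (ms xs zs : List Int), ms.length = n →
      reverseCharLoop (xs ++ ms ++ zs) (xs.length : Int) ((xs.length : Int) + ms.length - 1)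
        = xs ++ ms.reverse ++ zs := by
  induction n using Nat.strong_induction_on with
  | _ n ih =>
  intro ms xs zs hn
  by_cases h1 : ms.length ≤ 1
  · rcases ms with _ | ⟨m, ms2⟩
    · rw [reverseCharLoop]; simp
    · have hnil : ms2 = [] := by
        cases ms2
        · rfl
        · simp at h1
      subst hnil
      rw [reverseCharLoop]; simp
  · replace h1 : 1 < ms.length := by omega
    obtain ⟨x, rest, rfl⟩ : ∃ x rest, ms = x :: rest := by
      cases ms with
      | nil => simp at h1
      | cons x rest => exact ⟨x, rest, rfl⟩
    obtain ⟨ms', y, rfl⟩ : ∃ ms' y, rest = ms' ++ [y] := by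
      rcases List.eq_nil_or_concat rest with h | ⟨ms', y, h⟩
      · subst h; simp at h1
      · exact ⟨ms', y, by simpa using h⟩
    rw [reverseCharLoop]
    have hlen : (x :: (ms' ++ [y])).length = ms'.length + 2 := by simp
    have hij : (xs.length : Int) < (xs.length : Int) + (x :: (ms' ++ [y])).length - 1 := by
      rw [hlen]; push_cast; omega
    rw [dif_pos hij]
    have hj : (xs.length : Int) + (x :: (ms' ++ [y])).length - 1
        = ((xs.length + ms'.length + 1 : Nat) : Int) := by rw [hlen]; push_cast; ring
    have harr : xs ++ (x :: (ms' ++ [y])) ++ zs = xs ++ x :: (ms' ++ y :: zs) := by simp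
    have hgi : PySem.List.pyGet? (xs ++ (x :: (ms' ++ [y])) ++ zs) (xs.length : Int) = some x := by
      rw [harr, PySem.List.pyGet?_natCast]
      simp
    have hgj : PySem.List.pyGet? (xs ++ (x :: (ms' ++ [y])) ++ zs)
        ((xs.length : Int) + (x :: (ms' ++ [y])).length - 1) = some y := by
      rw [hj, harr, PySem.List.pyGet?_natCast]
      have hsplit : xs ++ x :: (ms' ++ y :: zs) = (xs ++ x :: ms') ++ y :: zs := by simp
      rw [hsplit]
      have h2 : xs.length + ms'.length + 1 = (xs ++ x :: ms').length := by simp; omega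
      simp [h2]
    simp only [hgi, hgj]
    have hset : PySem.List.pySetD (PySem.List.pySetD (xs ++ (x :: (ms' ++ [y])) ++ zs)
          (xs.length : Int) y) ((xs.length : Int) + (x :: (ms' ++ [y])).length - 1) x
        = (xs ++ [y]) ++ ms' ++ (x :: zs) := by
      rw [hj]
      simp only [PySem.List.pySetD_natCast]
      rw [harr]
      have e1 : (xs ++ x :: (ms' ++ y :: zs)).set xs.length y = xs ++ y :: (ms' ++ y :: zs) := by
        rw [List.set_append_right _ _ (Nat.le_refl _)]
        simp
      rw [e1]
      have e2 : xs ++ y :: (ms' ++ y :: zs) = (xs ++ y :: ms') ++ y :: zs := by simp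
      rw [e2, List.set_append_right]
      · have e3 : xs.length + ms'.length + 1 - (xs ++ y :: ms').length = 0 := by simp
        rw [e3]
        simp
      · simp; omega
    rw [hset]
    have hargs1 : (xs.length : Int) + 1 = (((xs ++ [y]).length : Nat) : Int) := by simp
    have hargs2 : (xs.length : Int) + (x :: (ms' ++ [y])).length - 1 - 1
        = (((xs ++ [y]).length : Nat) : Int) + (ms'.length : Int) - 1 := by
      rw [hlen]; push_cast; simp; ring
    rw [hargs1, hargs2]
    rw [ih ms'.length (by simp at hn; omega) ms' (xs ++ [y]) (x :: zs) rfl]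
    simp

theorem reverseCharLoop_decomp (ms xs zs : List Int) :
    reverseCharLoop (xs ++ ms ++ zs) (xs.length : Int) ((xs.length : Int) + ms.length - 1)
      = xs ++ ms.reverse ++ zs :=
  reverseCharLoop_decomp_aux ms.length ms xs zs rfl

-- take/middle/drop decomposition of a list around positions i ≤ j < length
theorem list_decomp (a : List Int) (i j : Nat) (hij : i ≤ j) (_hj : j < a.length) :
    a = a.take i ++ ((a.drop i).take (j - i + 1)) ++ a.drop (j + 1) := by
  have h1 : (a.drop i).take (j - i + 1) ++ a.drop (j + 1)
      = (a.drop i).take (j - i + 1) ++ (a.drop i).drop (j - i + 1) := by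
    have e : i + (j - i + 1) = j + 1 := by omega
    rw [List.drop_drop, e]
  rw [List.append_assoc, h1, List.take_append_drop, List.take_append_drop]

theorem reverseChar_spec : Claim_equal_reverseChar := by
  unfold Claim_equal_reverseChar
  intro a start end_ _hdom hpre
  unfold Spec_reverseChar reverseChar reverseChar_alt
  by_cases hlt : start < end_
  · rcases hpre with h | ⟨hs, he⟩
    · omega
    · -- 0 ≤ start < end_ < a.length
      have h0e : 0 ≤ end_ := le_of_lt (lt_of_le_of_lt hs hlt)
      set i := start.toNat with hi
      set j := end_.toNat with hjj
      have hsi : start = (i : Int) := by omega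
      have hej : end_ = (j : Int) := by omega
      have hij : i < j := by omega
      have hjlen : j < a.length := by omega
      rw [if_pos hlt]
      have hlo : PySem.List.clampIdx a.length start = i := by
        rw [hsi, PySem.List.clampIdx_natCast]; omega
      have hhi : PySem.List.clampIdx a.length (end_ + 1) = j + 1 := by
        have h3 : end_ + 1 = ((j + 1 : Nat) : Int) := by omega
        rw [h3, PySem.List.clampIdx_natCast]; omega
      have hseg : PySem.List.slice a (some start) (some (end_ + 1))
          = (a.drop i).take (j - i + 1) := by
        rw [PySem.List.slice_toNat a hs (by omega)]
        congr 1
        omega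
      have hmax : max i (j + 1) = j + 1 := by omega
      simp only [hlo, hhi, hseg, hmax]
      show reverseCharLoop a start end_
          = a.take i ++ ((a.drop i).take (j - i + 1)).reverse ++ a.drop (j + 1)
      have hxs : (a.take i).length = i := by
        rw [List.length_take]; omega
      have hms : ((a.drop i).take (j - i + 1)).length = j - i + 1 := by
        rw [List.length_take, List.length_drop]; omega
      have key := reverseCharLoop_decomp ((a.drop i).take (j - i + 1)) (a.take i) (a.drop (j + 1))
      rw [hxs, hms] at key
      have hj2 : end_ = (i : Int) + ((j - i + 1 : Nat) : Int) - 1 := by omega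
      rw [hsi, hj2]
      conv_lhs => rw [list_decomp a i j (le_of_lt hij) hjlen]
      exact key
  · rw [reverseCharLoop, dif_neg hlt, if_neg hlt]
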